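-- pv_equiv track=rewrite | github.com/jlaine/pyguitar | scripts/tool.py | parse_strum_pattern
-- ===== SOURCE A (Python) =====
-- def parse_strum_pattern(pattern: str, beat_time=480) -> list[list[tuple[str, int]]]:
--     output = []
--     for chunk in pattern.split("/"):
--         events = []
--         assert chunk[0] in ("D", "U"), "strum pattern chunk must start with a strum"
--         for strum in chunk:
--             if strum in ("D", "U"):
--                 events += [
--                     ("note_on", 0),
--                     ("note_off", int(beat_time / 2)),
--                 ]
--             else:
--                 assert strum == "-"
--                 events[-1] = (events[-1][0], events[-1][1] + int(beat_time / 2))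
--         output.append(events)
--     return output
-- ===== SOURCE B (Python) =====
-- def parse_strum_pattern(pattern: str, beat_time=480) -> list[list[tuple[str, int]]]:
--     half = int(beat_time / 2)
--     output = []
--     for chunk in pattern.split("/"):
--         assert chunk[0] in ("D", "U"), "strum pattern chunk must start with a strum"
--         events = []
--         i = 0
--         n = len(chunk)
--         while i < n:
--             assert chunk[i] in ("D", "U")
--             j = i + 1
--             while j < n and chunk[j] == "-":
--                 j += 1
--             events.append(("note_on", 0))
--             events.append(("note_off", half * (j - i)))
--             i = j
--         output.append(events)
--     return output
-- ===== Notes on version B (the rewrite author's own statement) =====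
-- stated objective: alternative
-- what changed: B groups each strum with its run of following '-' characters in one index scan and emits a single note_on/note_off pair with the duration computed once as half*(run length), instead of A's emit-pair-then-mutate-the-last-event accumulation.
import Mathlib
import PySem

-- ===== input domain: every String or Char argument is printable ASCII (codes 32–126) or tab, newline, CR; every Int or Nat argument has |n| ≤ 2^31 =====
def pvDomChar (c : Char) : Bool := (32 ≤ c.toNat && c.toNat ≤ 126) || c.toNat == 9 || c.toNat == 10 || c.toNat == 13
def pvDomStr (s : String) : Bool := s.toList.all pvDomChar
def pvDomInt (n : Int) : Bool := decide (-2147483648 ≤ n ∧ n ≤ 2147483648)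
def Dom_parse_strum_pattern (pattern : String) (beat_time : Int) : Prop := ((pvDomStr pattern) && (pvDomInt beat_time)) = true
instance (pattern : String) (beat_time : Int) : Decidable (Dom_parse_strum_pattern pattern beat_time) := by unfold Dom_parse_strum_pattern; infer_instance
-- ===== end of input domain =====

-- B re-implements the strum parser by a group-and-compute-duration-once index scan;
-- return-value equivalence is proved on Pre_ (patterns whose '/'-chunks are nonempty,
-- start with a strum and contain only 'D','U','-' — exactly the inputs where A returns).

-- ===== PORT A =====
-- int(beat_time / 2): exact float halving then truncation toward zero = Int.tdiv on |n| ≤ 2^31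
-- events[-1] mutation: totalized with dropLast/getLast? (the empty case is unreachable inside Pre_)
def pvAStep (h : Int) (events : List (String × Int)) (c : Char) : List (String × Int) :=
  if c = 'D' ∨ c = 'U' then
    events ++ [("note_on", (0 : Int)), ("note_off", h)]
  else
    match events.getLast? with
    | some last => events.dropLast ++ [(last.1, last.2 + h)]
    | none => events

def parse_strum_pattern (pattern : String) (beat_time : Int) : List (List (String × Int)) :=
  (PySem.Chars.splitOn pattern.toList "/".toList).foldl
    (fun output chunk => output ++ [chunk.foldl (pvAStep (beat_time.tdiv 2)) []]) []

-- ===== PORT B =====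
-- count of the leading run of '-' (B's inner while loop)
def pvDashRun : List Char → Nat
  | '-' :: rest => pvDashRun rest + 1
  | _ => 0

-- B's outer while loop over one chunk
def pvBChunk (h : Int) (cs : List Char) : List (String × Int) :=
  match cs with
  | [] => []
  | _ :: rest =>
    let r := pvDashRun rest
    ("note_on", (0 : Int)) :: ("note_off", h * (r + 1)) :: pvBChunk h (rest.drop r)
termination_by cs.length
decreasing_by
  simp only [List.length_drop, List.length_cons]
  omega

def parse_strum_pattern_alt (pattern : String) (beat_time : Int) : List (List (String × Int)) :=
  (PySem.Chars.splitOn pattern.toList "/".toList).map (pvBChunk (beat_time.tdiv 2))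

-- ===== PRECONDITION & SPEC =====
-- Pre_ excludes exactly the inputs where A raises: a chunk that is empty (IndexError on
-- chunk[0]), does not start with 'D'/'U', or contains a character other than 'D','U','-'
-- (AssertionError).
def Pre_parse_strum_pattern (pattern : String) (beat_time : Int) : Prop :=
  ∀ chunk ∈ PySem.Chars.splitOn pattern.toList "/".toList,
    (chunk.head? = some 'D' ∨ chunk.head? = some 'U') ∧
    chunk.all (fun c => c == 'D' || c == 'U' || c == '-') = true
instance (pattern : String) (beat_time : Int) : Decidable (Pre_parse_strum_pattern pattern beat_time) := by
  unfold Pre_parse_strum_pattern; infer_instance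

def pvWitness_parse_strum_pattern : String × Int := ("D-U/DU", 8)

def Spec_parse_strum_pattern (pattern : String) (beat_time : Int) (out : List (List (String × Int))) : Prop := out = parse_strum_pattern_alt pattern beat_time
instance (pattern : String) (beat_time : Int) (out : List (List (String × Int))) : Decidable (Spec_parse_strum_pattern pattern beat_time out) := by unfold Spec_parse_strum_pattern; infer_instance

-- ===== CLAIM (what is proved, stated in full; the proofs are below) =====
def Claim_equal_parse_strum_pattern : Prop := ∀ (pattern : String) (beat_time : Int), Dom_parse_strum_pattern pattern beat_time → Pre_parse_strum_pattern pattern beat_time → Spec_parse_strum_pattern pattern beat_time (parse_strum_pattern pattern beat_time)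

-- ===== LEMMAS AND PROOFS =====

-- Main loop invariant: folding A's step over valid characters, starting from an
-- accumulator ending in (s, v), extends v by h·(leading dash run) and then behaves
-- like B's chunk scanner on the remainder.
theorem pvFold_aStep (h : Int) (cs : List Char)
    (hvalid : ∀ c ∈ cs, c = 'D' ∨ c = 'U' ∨ c = '-') (acc : List (String × Int))
    (s : String) (v : Int) :
    List.foldl (pvAStep h) (acc ++ [(s, v)]) cs
      = acc ++ [(s, v + h * (pvDashRun cs))] ++ pvBChunk h (cs.drop (pvDashRun cs)) := by
  induction cs generalizing acc s v with
  | nil => simp [pvDashRun, pvBChunk]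
  | cons c rest ih =>
    have hc := hvalid c (by simp)
    have hrest : ∀ x ∈ rest, x = 'D' ∨ x = 'U' ∨ x = '-' := fun x hx => hvalid x (by simp [hx])
    rcases hc with hc | hc | hc
    · -- strum 'D'
      subst hc
      have hstep : pvAStep h (acc ++ [(s, v)]) 'D'
          = (acc ++ [(s, v), ("note_on", (0 : Int))]) ++ [("note_off", h)] := by
        simp [pvAStep]
      simp only [List.foldl_cons, hstep,
        ih hrest (acc ++ [(s, v), ("note_on", (0 : Int))]) "note_off" h]
      simp [pvDashRun, pvBChunk]
      ring_nf
    · -- strum 'U'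
      subst hc
      have hstep : pvAStep h (acc ++ [(s, v)]) 'U'
          = (acc ++ [(s, v), ("note_on", (0 : Int))]) ++ [("note_off", h)] := by
        simp [pvAStep]
      simp only [List.foldl_cons, hstep,
        ih hrest (acc ++ [(s, v), ("note_on", (0 : Int))]) "note_off" h]
      simp [pvDashRun, pvBChunk]
      ring_nf
    · -- dash: updates the last event in place
      subst hc
      have hstep : pvAStep h (acc ++ [(s, v)]) '-' = acc ++ [(s, v + h)] := by
        simp [pvAStep]
      simp only [List.foldl_cons, hstep, ih hrest acc s (v + h)]
      simp only [pvDashRun]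
      congr 2
      push_cast
      ring_nf

-- One valid chunk: A's fold equals B's scan.
theorem pvChunk_eq (h : Int) (chunk : List Char)
    (hhead : chunk.head? = some 'D' ∨ chunk.head? = some 'U')
    (hvalid : ∀ c ∈ chunk, c = 'D' ∨ c = 'U' ∨ c = '-') :
    chunk.foldl (pvAStep h) [] = pvBChunk h chunk := by
  cases chunk with
  | nil => simp at hhead
  | cons c rest =>
    have hrest : ∀ x ∈ rest, x = 'D' ∨ x = 'U' ∨ x = '-' := fun x hx => hvalid x (by simp [hx])
    have hc : c = 'D' ∨ c = 'U' := by
      rcases hhead with hh | hh <;> simp at hh <;> [left; right] <;> exact hh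
    have hstep : List.foldl (pvAStep h) [] (c :: rest)
        = List.foldl (pvAStep h) ([("note_on", (0 : Int))] ++ [("note_off", h)]) rest := by
      rcases hc with hc | hc <;> subst hc <;> simp [pvAStep]
    rw [hstep, pvFold_aStep h rest hrest [("note_on", (0 : Int))] "note_off" h]
    simp only [pvBChunk]
    simp
    ring_nf

-- ===== VERDICT (by name: the statement is the Claim_ definition above) =====
theorem parse_strum_pattern_spec : Claim_equal_parse_strum_pattern := by
  intro pattern beat_time _ hpre
  unfold Spec_parse_strum_pattern parse_strum_pattern parse_strum_pattern_alt
  set h := beat_time.tdiv 2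
  set chunks := PySem.Chars.splitOn pattern.toList "/".toList with hchunks
  have : ∀ (init : List (List (String × Int))),
      (∀ chunk ∈ chunks, (chunk.head? = some 'D' ∨ chunk.head? = some 'U') ∧
        chunk.all (fun c => c == 'D' || c == 'U' || c == '-') = true) →
      chunks.foldl (fun output chunk => output ++ [chunk.foldl (pvAStep h) []]) init
        = init ++ chunks.map (pvBChunk h) := by
    clear hpre hchunks
    induction chunks with
    | nil => simp
    | cons chunk rest ih =>
      intro init hp
      have h1 := hp chunk (by simp)
      simp only [List.foldl_cons, List.map_cons]
      have hv : ∀ c ∈ chunk, c = 'D' ∨ c = 'U' ∨ c = '-' := by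
        intro c hc
        have := List.all_eq_true.mp h1.2 c hc
        simp at this
        tauto
      rw [ih (init ++ [chunk.foldl (pvAStep h) []]) (fun c hc => hp c (by simp [hc])),
        pvChunk_eq h chunk h1.1 hv]
      simp
  rw [this [] hpre]
  simp
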